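-- pv_equiv track=rewrite | github.com/Jeongsiwook/CodingTest | Greedy/06.무지의_먹방_라이브v1.py | solution
-- ===== SOURCE A (Python) =====
-- def solution(food_times, k):
--     answer = 0
--     time = 0
--     i = 0
--     length = len(food_times)
--     sumArr = sum(food_times)
--
--     while True:
--         i %= length # 인덱스가 맨 마지막 인덱스를 넘어갈 시에 되돌려줌
--         # 리스트 요소들이 모두 0이 되어버릴 경우
--         if time == sumArr:
--             return -1
--         # 네트워크 오류가 발생할 경우
--         if time == k:
--             while True:
--                 # 최종 위치 요소가 0일 경우
--                 if food_times[i] == 0: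
--                     i = (i + 1) % length
--                 else:
--                     answer = i + 1 # 다음 위치 지목
--                     break
--             return answer # 최종 결과 반환
--         # 요소가 0이 아닐 경우
--         if food_times[i] != 0:
--             food_times[i] -= 1
--             i += 1
--             time += 1
--         # 요소가 0일 경우
--         else:
--             i += 1
--             continue
-- ===== SOURCE B (Python) =====
-- def solution(food_times, k):
--     total = sum(food_times)
--     # all food gone before the interruption (total is the total eating time)
--     if 0 <= total <= k:
--         return -1
--     times = list(food_times)
--     while True:
--         alive = [i for i, t in enumerate(times) if t != 0]
--         if k < len(alive):
--             return alive[k] + 1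
--         k -= len(alive)
--         times = [t - 1 if t != 0 else t for t in times]
-- ===== Notes on version B (the rewrite author's own statement) =====
-- stated objective: alternative
-- what changed: B replaces A's one-unit-at-a-time cyclic simulation (index pointer, in-place decrements, zero-skipping) by whole-round processing: it decides the -1 case up front from sum(food_times), then repeatedly subtracts the number of still-nonzero foods from k and decrements them all at once, indexing the list of survivors when k falls inside the current round.
-- outside the precondition, e.g. on solution([5], -1): A returns -1, B returns 1
import Mathlib
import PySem

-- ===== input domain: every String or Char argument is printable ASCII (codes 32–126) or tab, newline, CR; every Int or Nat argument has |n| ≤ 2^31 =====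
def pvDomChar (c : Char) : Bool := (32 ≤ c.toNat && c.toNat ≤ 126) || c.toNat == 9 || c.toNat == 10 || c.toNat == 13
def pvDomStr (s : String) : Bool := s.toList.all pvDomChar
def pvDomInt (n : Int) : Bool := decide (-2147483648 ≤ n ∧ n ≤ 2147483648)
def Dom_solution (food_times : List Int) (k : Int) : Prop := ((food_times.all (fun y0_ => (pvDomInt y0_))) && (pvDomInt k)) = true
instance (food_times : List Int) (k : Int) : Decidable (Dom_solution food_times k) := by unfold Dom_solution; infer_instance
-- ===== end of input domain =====

-- B replaces A's unit-by-unit cyclic simulation by whole-round processing (objective: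
-- alternative; not claimed faster). Python A mutates food_times in place (decrements
-- its entries); the equivalence proved here is about the return value only.

-- ===== PORT A =====
-- A's two `while True` loops are ported with a fuel guard (returning 0 on exhaustion);
-- the fuel supplied in `solution` (and `arr.length + 1` for the inner scan) is proved
-- sufficient on every input admitted by Pre_solution, so the port computes exactly
-- what A computes there.
def innerA (fuel : Nat) (food_times : List Int) (length : Int) (i : Int) : Int :=
  match fuel with
  | 0 => 0
  | f + 1 =>
    if PySem.List.pyGetD food_times i 0 = 0 then
      innerA f food_times length (PySem.Int.mod (i + 1) length)
    else i + 1

def outerA (fuel : Nat) (food_times : List Int) (length sumArr k time i : Int) : Int :=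
  match fuel with
  | 0 => 0
  | f + 1 =>
    let i' := PySem.Int.mod i length
    if time = sumArr then -1
    else if time = k then innerA (food_times.length + 1) food_times length i'
    else if PySem.List.pyGetD food_times i' 0 ≠ 0 then
      outerA f (PySem.List.pySetD food_times i' (PySem.List.pyGetD food_times i' 0 - 1))
        length sumArr k (time + 1) (i' + 1)
    else
      outerA f food_times length sumArr k time (i' + 1)

def solution (food_times : List Int) (k : Int) : Int :=
  outerA ((k.toNat + (food_times.map Int.toNat).sum + 1) * (food_times.length + 2) + food_times.length + 2)
    food_times (PySem.List.len food_times) food_times.sum k 0 0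

-- ===== PORT B =====
def decOne (t : Int) : Int := if t ≠ 0 then t - 1 else t

def aliveIdx (times : List Int) : List Int :=
  ((PySem.List.enumerate times).filter (fun p => decide (p.2 ≠ 0))).map (fun p => p.1)

-- Source B's `while True` round loop, with a fuel guard proved sufficient wherever it is called.
def roundB (fuel : Nat) (times : List Int) (k : Int) : Int :=
  match fuel with
  | 0 => 0
  | f + 1 =>
    let alive := aliveIdx times
    if k < (alive.length : Int) then PySem.List.pyGetD alive k 0 + 1
    else roundB f (times.map decOne) (k - (alive.length : Int))

def solution_alt (food_times : List Int) (k : Int) : Int :=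
  let total := food_times.sum
  if 0 ≤ total ∧ total ≤ k then -1
  else roundB (k.toNat + 1) food_times k

-- ===== PRECONDITION & SPEC =====
-- Pre_ asks for a nonempty food list and a nonnegative interruption time k. It excludes
-- inputs on which A still returns: for k < 0 (outside the problem's natural domain,
-- where k is an elapsed time) A eats everything and returns -1, while B's round loop
-- indexes with the negative k. On the empty list A raises ZeroDivisionError (i %= 0).
def Pre_solution (food_times : List Int) (k : Int) : Prop :=
  food_times ≠ [] ∧ 0 ≤ k
instance (food_times : List Int) (k : Int) : Decidable (Pre_solution food_times k) := by
  unfold Pre_solution; infer_instance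

def pvWitness_solution : List Int × Int := ([3, 1, 2], 5)

def Spec_solution (food_times : List Int) (k : Int) (out : Int) : Prop := out = solution_alt food_times k
instance (food_times : List Int) (k : Int) (out : Int) : Decidable (Spec_solution food_times k out) := by
  unfold Spec_solution; infer_instance

-- ===== CLAIM (what is proved, stated in full; the proofs are below) =====
def Claim_equal_solution : Prop := ∀ (food_times : List Int) (k : Int), Dom_solution food_times k → Pre_solution food_times k → Spec_solution food_times k (solution food_times k)

-- ===== LEMMAS AND PROOFS =====

-- One-step unfolding equations for the fueled loops.
lemma innerA_succ (f : Nat) (arr : List Int) (L i : Int) :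
    innerA (f + 1) arr L i =
      if PySem.List.pyGetD arr i 0 = 0 then innerA f arr L (PySem.Int.mod (i + 1) L)
      else i + 1 := rfl

lemma outerA_succ (f : Nat) (arr : List Int) (L S0 k t i : Int) :
    outerA (f + 1) arr L S0 k t i =
      if t = S0 then -1
      else if t = k then innerA (arr.length + 1) arr L (PySem.Int.mod i L)
      else if PySem.List.pyGetD arr (PySem.Int.mod i L) 0 ≠ 0 then
        outerA f (PySem.List.pySetD arr (PySem.Int.mod i L)
            (PySem.List.pyGetD arr (PySem.Int.mod i L) 0 - 1)) L S0 k (t + 1)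
          (PySem.Int.mod i L + 1)
      else outerA f arr L S0 k t (PySem.Int.mod i L + 1) := rfl

lemma roundB_succ (f : Nat) (times : List Int) (kk : Int) :
    roundB (f + 1) times kk =
      if kk < ((aliveIdx times).length : Int) then PySem.List.pyGetD (aliveIdx times) kk 0 + 1
      else roundB f (times.map decOne) (kk - ((aliveIdx times).length : Int)) := rfl

-- `aliveL l s` = indices (offset by s) of the nonzero entries of l; `aliveFrom arr j`
-- = positions ≥ j of arr holding a nonzero entry; `decFrom arr j` = arr with its
-- nonzero entries at positions ≥ j decremented.  These describe the state of A's
-- simulation at position j inside a round, and targetR is the value B computes from it.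
def aliveL : List Int → Nat → List Nat
  | [], _ => []
  | t :: ts, s => if t ≠ 0 then s :: aliveL ts (s + 1) else aliveL ts (s + 1)

def aliveFrom (arr : List Int) (j : Nat) : List Nat := aliveL (arr.drop j) j

def decFrom (arr : List Int) (j : Nat) : List Int := arr.take j ++ (arr.drop j).map decOne

def targetR (arr : List Int) (j rem : Nat) : Int :=
  if rem < (aliveFrom arr j).length then ((aliveFrom arr j).getD rem 0 : Int) + 1
  else roundB (rem - (aliveFrom arr j).length + 1) (decFrom arr j)
        ((rem : Int) - ((aliveFrom arr j).length : Int))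

def innerRes (arr : List Int) (j : Nat) : Int :=
  match aliveFrom arr j with
  | p :: _ => (p : Int) + 1
  | [] =>
    match aliveFrom arr 0 with
    | p :: _ => (p : Int) + 1
    | [] => 0

lemma mod_cast_lt (a L : Nat) (h : a < L) :
    PySem.Int.mod (a : Int) (L : Int) = (a : Int) := by
  rw [PySem.Int.mod_eq_emod_of_pos (by exact_mod_cast Nat.zero_lt_of_lt h)]
  exact Int.emod_eq_of_lt (by positivity) (by exact_mod_cast h)

lemma mod_cast_self (L : Nat) (h : 0 < L) :
    PySem.Int.mod (L : Int) (L : Int) = ((0 : Nat) : Int) := by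
  rw [PySem.Int.mod_eq_emod_of_pos (by exact_mod_cast h)]
  simp

lemma aliveIdx_eq_aux : ∀ (l : List Int) (s : Nat),
    ((PySem.List.enumerate l (s : Int)).filter (fun p => decide (p.2 ≠ 0))).map (fun p => p.1)
      = (aliveL l s).map (fun n : Nat => (n : Int)) := by
  intro l
  induction l with
  | nil => intro s; simp [PySem.List.enumerate_nil, aliveL]
  | cons t ts ih =>
    intro s
    have hc : (s : Int) + 1 = ((s + 1 : Nat) : Int) := by push_cast; ring
    rw [PySem.List.enumerate_cons, List.filter_cons, hc]
    by_cases h : t ≠ 0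
    · rw [if_pos (by simpa using h), List.map_cons, ih (s + 1)]
      simp [aliveL, h]
    · rw [if_neg (by simpa using h), ih (s + 1)]
      simp [aliveL, h]

lemma aliveIdx_eq (l : List Int) : aliveIdx l = (aliveL l 0).map (fun n : Nat => (n : Int)) := by
  have h := aliveIdx_eq_aux l 0
  simpa [aliveIdx] using h

lemma af_zero (arr : List Int) : aliveFrom arr 0 = aliveL arr 0 := by
  unfold aliveFrom; rw [List.drop_zero]

lemma af_step (arr : List Int) (j : Nat) (h : j < arr.length) :
    aliveFrom arr j = if arr[j] ≠ 0 then j :: aliveFrom arr (j + 1) else aliveFrom arr (j + 1) := by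
  unfold aliveFrom
  rw [List.drop_eq_getElem_cons h]
  rfl

lemma af_len (arr : List Int) : aliveFrom arr arr.length = [] := by
  unfold aliveFrom
  rw [List.drop_length]
  rfl

lemma af_nil_of_le (arr : List Int) (j : Nat) (h : arr.length ≤ j) : aliveFrom arr j = [] := by
  unfold aliveFrom
  rw [List.drop_eq_nil_of_le h]
  rfl

lemma af_set (arr : List Int) (j : Nat) (v : Int) :
    aliveFrom (arr.set j v) (j + 1) = aliveFrom arr (j + 1) := by
  unfold aliveFrom
  rw [List.drop_set_of_lt (by omega : j < j + 1)]

lemma aliveL_nil_zero : ∀ (l : List Int) (s : Nat), aliveL l s = [] → ∀ x ∈ l, x = 0 := by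
  intro l
  induction l with
  | nil => intro s _ x hx; simp at hx
  | cons t ts ih =>
    intro s hl x hx
    by_cases h : t ≠ 0
    · rw [aliveL, if_pos h] at hl; simp at hl
    · rw [aliveL, if_neg h] at hl
      rcases List.mem_cons.mp hx with rfl | hx'
      · omega
      · exact ih (s + 1) hl x hx'

lemma af_head : ∀ (d : Nat) (arr : List Int) (j p : Nat) (rest : List Nat),
    arr.length - j = d → j ≤ arr.length → aliveFrom arr j = p :: rest →
    j ≤ p ∧ ∃ (hp : p < arr.length), arr[p] ≠ 0 ∧ aliveFrom arr (p + 1) = rest ∧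
      (∀ q (hq : q < arr.length), j ≤ q → q < p → arr[q] = 0) := by
  intro d
  induction d using Nat.strong_induction_on with
  | _ d IH =>
    intro arr j p rest hd hj haf
    rcases Nat.lt_or_ge j arr.length with hlt | hge
    · rw [af_step arr j hlt] at haf
      by_cases hpos : arr[j] ≠ 0
      · rw [if_pos hpos] at haf
        injection haf with h1 h2
        subst h1
        exact ⟨le_refl _, hlt, hpos, h2, fun q hq h1' h2' => by omega⟩
      · rw [if_neg hpos] at haf
        obtain ⟨h1, hp, hpos', hrest, hzz⟩ :=
          IH (arr.length - (j + 1)) (by omega) arr (j + 1) p rest rfl (by omega) haf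
        refine ⟨by omega, hp, hpos', hrest, ?_⟩
        intro q hq hjq hqp
        rcases Nat.eq_or_lt_of_le hjq with heq | hlt2
        · subst heq
          omega
        · exact hzz q hq (by omega) hqp
    · rw [af_nil_of_le arr j hge] at haf; simp at haf

lemma af_nil (arr : List Int) (j : Nat)
    (h : aliveFrom arr j = []) : ∀ q (hq : q < arr.length), j ≤ q → arr[q] = 0 := by
  intro q hq hjq
  unfold aliveFrom at h
  have hall := aliveL_nil_zero (arr.drop j) j h
  have hql : q - j < (arr.drop j).length := by simp [List.length_drop]; omega
  have hmem : arr[q] ∈ arr.drop j := by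
    have hg : (arr.drop j)[q - j] = arr[q] := by
      rw [List.getElem_drop]
      congr 1
      omega
    exact hg ▸ List.getElem_mem hql
  exact hall _ hmem

lemma decFrom_zero (arr : List Int) : decFrom arr 0 = arr.map decOne := by
  unfold decFrom; simp

lemma decFrom_len (arr : List Int) : decFrom arr arr.length = arr := by
  unfold decFrom; simp

lemma decFrom_set (arr : List Int) (j : Nat) (h : j < arr.length) (hpos : arr[j] ≠ 0) :
    decFrom (arr.set j (arr[j] - 1)) (j + 1) = decFrom arr j := by
  unfold decFrom
  rw [List.drop_set_of_lt (by omega : j < j + 1), List.take_set,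
    List.take_succ_eq_append_getElem h]
  conv_rhs => rw [List.drop_eq_getElem_cons h]
  rw [List.map_cons]
  have hset : (List.take j arr ++ [arr[j]]).set j (arr[j] - 1)
      = List.take j arr ++ [arr[j] - 1] := by
    rw [List.set_append]
    simp [List.length_take, Nat.min_eq_left (le_of_lt h)]
  rw [hset]
  simp [decOne, hpos, List.append_assoc]

lemma decFrom_skip (arr : List Int) (j : Nat) (h : j < arr.length) (hz : arr[j] = 0) :
    decFrom arr (j + 1) = decFrom arr j := by
  unfold decFrom
  conv_rhs => rw [List.drop_eq_getElem_cons h]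
  rw [List.map_cons, show decOne arr[j] = arr[j] from by simp [decOne, hz]]
  rw [List.take_succ_eq_append_getElem h, List.append_assoc]
  simp only [List.singleton_append]

lemma decFrom_eq_map_of_zeros (arr : List Int) (p : Nat)
    (hz : ∀ q (hq : q < arr.length), q < p → arr[q] = 0) :
    decFrom arr p = arr.map decOne := by
  unfold decFrom
  have hsplit : arr.map decOne = (arr.take p).map decOne ++ (arr.drop p).map decOne := by
    rw [← List.map_append, List.take_append_drop]
  rw [hsplit]
  congr 1
  apply List.ext_getElem
  · simp
  · intro q h1 h2
    have hq : q < arr.length := by simp at h1; omega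
    have hqp : q < p := by simp at h1; omega
    rw [List.getElem_map, List.getElem_take, hz q hq hqp]
    simp [decOne]

lemma decFrom_of_af_nil (arr : List Int) (j : Nat) (h : aliveFrom arr j = []) :
    decFrom arr j = arr := by
  unfold aliveFrom at h
  have hall := aliveL_nil_zero _ _ h
  unfold decFrom
  have hmap : (arr.drop j).map decOne = arr.drop j :=
    (List.map_congr_left (fun x hx => by simp [decOne, hall x hx])).trans (List.map_id _)
  rw [hmap, List.take_append_drop]

lemma sum_map_decOne : ∀ (l : List Int) (s : Nat),
    (l.map decOne).sum = l.sum - (aliveL l s).length := by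
  intro l
  induction l with
  | nil => intro s; simp [aliveL]
  | cons t ts ih =>
    intro s
    by_cases h : t ≠ 0 <;>
      simp [aliveL, h, decOne, ih (s + 1)] <;> push_cast <;> ring

lemma sum_set' : ∀ (l : List Int) (n : Nat) (v : Int), n < l.length →
    (l.set n v).sum = l.sum - l.getD n 0 + v := by
  intro l
  induction l with
  | nil => intro n v h; simp at h
  | cons t ts ih =>
    intro n v h
    cases n with
    | zero => simp; ring
    | succ m =>
      have hm : m < ts.length := by simpa using h
      simp [ih m v hm]
      ring

lemma sum_le_toNat : ∀ (l : List Int), l.sum ≤ ((l.map Int.toNat).sum : Int) := by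
  intro l
  induction l with
  | nil => simp
  | cons t ts ih =>
    simp only [List.map_cons, List.sum_cons, Nat.cast_add]
    have := Int.self_le_toNat t
    omega

lemma sum_zero_of_af_nil (arr : List Int)
    (h : aliveFrom arr 0 = []) : arr.sum = 0 := by
  rw [af_zero] at h
  have hall := aliveL_nil_zero arr 0 h
  exact List.sum_eq_zero hall

lemma af_ne_nil_of_sum_ne (arr : List Int)
    (hs : arr.sum ≠ 0) : aliveFrom arr 0 ≠ [] := by
  intro h
  exact hs (sum_zero_of_af_nil arr h)

lemma getD_map_cast (l : List Nat) (n : Nat) :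
    (l.map (fun m : Nat => (m : Int))).getD n 0 = ((l.getD n 0 : Nat) : Int) := by
  rw [List.getD_eq_getElem?_getD, List.getD_eq_getElem?_getD, List.getElem?_map]
  cases l[n]? <;> simp

-- ----- inner loop (A's scan for the next nonzero food) -----

lemma inner_hit : ∀ (c : Nat) (arr : List Int) (j p : Nat) (rest : List Nat) (fuel : Nat),
    arr.length - j = c → aliveFrom arr j = p :: rest →
    p + 1 ≤ fuel + j →
    innerA fuel arr (arr.length : Int) (j : Int) = (p : Int) + 1 := by
  intro c
  induction c using Nat.strong_induction_on with
  | _ c IH =>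
    intro arr j p rest fuel hc haf hfuel
    have hjlt : j < arr.length := by
      rcases Nat.lt_or_ge j arr.length with h | h
      · exact h
      · rw [af_nil_of_le arr j h] at haf; simp at haf
    obtain ⟨hjp, hp, hpos, hrest, hzz⟩ :=
      af_head (arr.length - j) arr j p rest rfl hjlt.le haf
    obtain ⟨f, rfl⟩ : ∃ f, fuel = f + 1 := ⟨fuel - 1, by omega⟩
    rw [af_step arr j hjlt] at haf
    rw [innerA_succ, PySem.List.pyGetD_natCast, List.getD_eq_getElem _ _ hjlt]
    by_cases hb : arr[j] ≠ 0
    · rw [if_pos hb] at haf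
      injection haf with h1 h2
      subst h1
      rw [if_neg hb]
    · rw [if_neg hb] at haf
      have hj0 : arr[j] = 0 := by omega
      have hjp1 : j + 1 ≤ p := by
        obtain ⟨hjp', _, _, _, _⟩ :=
          af_head (arr.length - (j + 1)) arr (j + 1) p rest rfl (by omega) haf
        omega
      rw [hj0, if_pos rfl]
      have hcast : (j : Int) + 1 = ((j + 1 : Nat) : Int) := by push_cast; ring
      rw [hcast, mod_cast_lt (j + 1) arr.length (by omega)]
      exact IH (arr.length - (j + 1)) (by omega) arr (j + 1) p rest f rfl haf (by omega)

lemma inner_wrap : ∀ (c : Nat) (arr : List Int) (j p : Nat) (rest : List Nat) (fuel : Nat),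
    arr.length - j = c → j < arr.length →
    aliveFrom arr j = [] → aliveFrom arr 0 = p :: rest →
    arr.length + p + 1 ≤ fuel + j →
    innerA fuel arr (arr.length : Int) (j : Int) = (p : Int) + 1 := by
  intro c
  induction c using Nat.strong_induction_on with
  | _ c IH =>
    intro arr j p rest fuel hc hjlt haf haf0 hfuel
    rw [af_step arr j hjlt] at haf
    by_cases hb : arr[j] ≠ 0
    · rw [if_pos hb] at haf; simp at haf
    rw [if_neg hb] at haf
    have hj0 : arr[j] = 0 := by omega
    obtain ⟨f, rfl⟩ : ∃ f, fuel = f + 1 := ⟨fuel - 1, by omega⟩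
    rw [innerA_succ, PySem.List.pyGetD_natCast, List.getD_eq_getElem _ _ hjlt, hj0, if_pos rfl]
    have hcast : (j : Int) + 1 = ((j + 1 : Nat) : Int) := by push_cast; ring
    rcases Nat.lt_or_ge (j + 1) arr.length with hlt2 | hge2
    · rw [hcast, mod_cast_lt (j + 1) arr.length hlt2]
      exact IH (arr.length - (j + 1)) (by omega) arr (j + 1) p rest f rfl hlt2 haf haf0
        (by omega)
    · have hje : j + 1 = arr.length := by omega
      rw [hcast, hje, mod_cast_self arr.length (by omega)]
      exact inner_hit arr.length arr 0 p rest f (by omega) haf0 (by omega)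

lemma inner_full (arr : List Int) (j fuel : Nat)
    (hj : j < arr.length) (hne : aliveFrom arr 0 ≠ []) (hfuel : arr.length + 1 ≤ fuel) :
    innerA fuel arr (arr.length : Int) (j : Int) = innerRes arr j := by
  cases haf : aliveFrom arr j with
  | cons p rest =>
    obtain ⟨hjp, hp, -, -, -⟩ := af_head (arr.length - j) arr j p rest rfl hj.le haf
    rw [inner_hit (arr.length - j) arr j p rest fuel rfl haf (by omega)]
    simp [innerRes, haf]
  | nil =>
    obtain ⟨p, rest, haf0⟩ := List.exists_cons_of_ne_nil hne
    obtain ⟨-, hp, hpos, -, -⟩ := af_head arr.length arr 0 p rest (by omega) (Nat.zero_le _) haf0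
    have hpj : p < j := by
      by_contra hge
      have := af_nil arr j haf p hp (by omega)
      omega
    rw [inner_wrap (arr.length - j) arr j p rest fuel rfl hj haf haf0 (by omega)]
    simp [innerRes, haf, haf0]

-- ----- B's round loop: the result does not depend on the fuel once it suffices -----

lemma roundB_mono : ∀ (m : Nat) (times : List Int) (kk : Int) (f g : Nat),
    kk = (m : Int) → (times.sum < 0 ∨ kk < times.sum) →
    m + 1 ≤ f → m + 1 ≤ g →
    roundB f times kk = roundB g times kk := by
  intro m
  induction m using Nat.strong_induction_on with
  | _ m IH =>
    intro times kk f g hkk hcond hf hg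
    obtain ⟨f', rfl⟩ : ∃ x, f = x + 1 := ⟨f - 1, by omega⟩
    obtain ⟨g', rfl⟩ : ∃ x, g = x + 1 := ⟨g - 1, by omega⟩
    rw [roundB_succ, roundB_succ]
    by_cases hc : kk < ((aliveIdx times).length : Int)
    · rw [if_pos hc, if_pos hc]
    · rw [if_neg hc, if_neg hc]
      have hkk0 : (0 : Int) ≤ kk := by rw [hkk]; positivity
      have hsne : times.sum ≠ 0 := by omega
      have hne := af_ne_nil_of_sum_ne times hsne
      rw [af_zero] at hne
      have hlen : 0 < (aliveL times 0).length := List.length_pos_iff.mpr hne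
      have hL : (aliveIdx times).length = (aliveL times 0).length := by
        rw [aliveIdx_eq]; simp
      have hmL : (aliveL times 0).length ≤ m := by
        rw [hL] at hc; omega
      apply IH (m - (aliveL times 0).length) (by omega)
      · rw [hL]; push_cast [Nat.cast_sub hmL]; omega
      · rw [sum_map_decOne times 0, hL]; omega
      · omega
      · omega

-- ----- how B's value evolves along A's single steps -----

lemma target_skip (arr : List Int) (j rem : Nat) (h : j < arr.length) (hz : arr[j] = 0) :
    targetR arr (j + 1) rem = targetR arr j rem := by
  unfold targetR
  rw [show aliveFrom arr (j + 1) = aliveFrom arr j from by rw [af_step arr j h]; simp [hz],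
    decFrom_skip arr j h hz]

lemma target_dec (arr : List Int) (j rem : Nat) (h : j < arr.length) (hpos : arr[j] ≠ 0)
    (hrem : 1 ≤ rem) :
    targetR (arr.set j (arr[j] - 1)) (j + 1) (rem - 1) = targetR arr j rem := by
  obtain ⟨r, rfl⟩ : ∃ r, rem = r + 1 := ⟨rem - 1, by omega⟩
  simp only [Nat.add_sub_cancel]
  unfold targetR
  rw [af_set, decFrom_set arr j h hpos,
    show aliveFrom arr j = j :: aliveFrom arr (j + 1) from by rw [af_step arr j h, if_pos hpos]]
  by_cases hc : r < (aliveFrom arr (j + 1)).length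
  · rw [if_pos hc,
      if_pos (show r + 1 < (j :: aliveFrom arr (j + 1)).length by simp; omega),
      List.getD_cons_succ]
  · rw [if_neg hc,
      if_neg (show ¬ r + 1 < (j :: aliveFrom arr (j + 1)).length by simp; omega)]
    have h1 : r + 1 - (j :: aliveFrom arr (j + 1)).length = r - (aliveFrom arr (j + 1)).length := by
      simp
    have h2 : ((r + 1 : Nat) : Int) - ((j :: aliveFrom arr (j + 1)).length : Int)
        = (r : Int) - ((aliveFrom arr (j + 1)).length : Int) := by
      simp only [List.length_cons]
      push_cast
      ring
    rw [h1, h2]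

lemma target_wrap (arr : List Int) (p rem : Nat) (rest : List Nat)
    (hrem : 1 ≤ rem) (hcond : arr.sum < 0 ∨ (rem : Int) < arr.sum)
    (haf : aliveFrom arr 0 = p :: rest) (hp : p < arr.length) (hpos : arr[p] ≠ 0)
    (hz : ∀ q (hq : q < arr.length), q < p → arr[q] = 0)
    (hrest : aliveFrom arr (p + 1) = rest) :
    targetR (arr.set p (arr[p] - 1)) (p + 1) (rem - 1) = targetR arr arr.length rem := by
  obtain ⟨r, rfl⟩ : ∃ r, rem = r + 1 := ⟨rem - 1, by omega⟩
  simp only [Nat.add_sub_cancel]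
  have hAI : aliveIdx arr = ((p :: rest).map (fun n : Nat => (n : Int))) := by
    rw [aliveIdx_eq, ← af_zero, haf]
  have hRHS : targetR arr arr.length (r + 1) = roundB (r + 1 + 1) arr ((r + 1 : Nat) : Int) := by
    unfold targetR
    rw [af_len, decFrom_len]
    simp only [List.length_nil, Nat.sub_zero, Nat.cast_zero, sub_zero]
    rw [if_neg (by omega)]
  rw [hRHS]
  unfold targetR
  rw [af_set, hrest, decFrom_set arr p hp hpos, decFrom_eq_map_of_zeros arr p hz]
  conv_rhs => rw [roundB_succ]
  rw [hAI]
  simp only [List.length_map, List.length_cons]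
  by_cases hc : r < rest.length
  · rw [if_pos hc,
      if_pos (show ((r + 1 : Nat) : Int) < ((rest.length + 1 : Nat) : Int) by push_cast; omega)]
    rw [PySem.List.pyGetD_natCast, getD_map_cast, List.getD_cons_succ]
  · rw [if_neg hc,
      if_neg (show ¬ ((r + 1 : Nat) : Int) < ((rest.length + 1 : Nat) : Int) by push_cast; omega)]
    have hn : rest.length ≤ r := by omega
    have harg : ((r + 1 : Nat) : Int) - ((rest.length + 1 : Nat) : Int)
        = (r : Int) - (rest.length : Int) := by
      push_cast; ring
    rw [harg]
    apply roundB_mono (r - rest.length)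
    · push_cast [Nat.cast_sub hn]; ring
    · rw [sum_map_decOne arr 0, ← af_zero, haf]
      simp only [List.length_cons]
      push_cast
      omega
    · omega
    · omega

lemma target_zero (arr : List Int) (j : Nat)
    (hs : arr.sum ≠ 0) : targetR arr j 0 = innerRes arr j := by
  cases haf : aliveFrom arr j with
  | cons p rest => simp [targetR, innerRes, haf]
  | nil =>
    obtain ⟨p0, r0, haf0⟩ := List.exists_cons_of_ne_nil (af_ne_nil_of_sum_ne arr hs)
    unfold targetR
    rw [haf, decFrom_of_af_nil arr j haf]
    rw [if_neg (by simp)]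
    simp only [List.length_nil, Nat.sub_zero, Nat.cast_zero, sub_zero, Nat.zero_add]
    rw [show (1 : Nat) = 0 + 1 from rfl, roundB_succ]
    have hAI : aliveIdx arr = ((p0 :: r0).map (fun n : Nat => (n : Int))) := by
      rw [aliveIdx_eq, ← af_zero, haf0]
    rw [hAI]
    simp only [List.length_map, List.length_cons]
    rw [if_pos (by push_cast; omega)]
    simp [innerRes, haf, haf0, PySem.List.pyGetD_zero_cons]

lemma target_round (arr : List Int) (rem : Nat)
    (hcond : arr.sum < 0 ∨ (rem : Int) < arr.sum) :
    targetR arr 0 rem = roundB (rem + 1) arr (rem : Int) := by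
  unfold targetR
  rw [af_zero, decFrom_zero]
  conv_rhs => rw [roundB_succ]
  rw [aliveIdx_eq]
  simp only [List.length_map]
  by_cases hc : rem < (aliveL arr 0).length
  · rw [if_pos hc, if_pos (by push_cast; omega)]
    rw [PySem.List.pyGetD_natCast, getD_map_cast]
  · rw [if_neg hc, if_neg (by push_cast; omega)]
    have hsne : arr.sum ≠ 0 := by
      have : (0 : Int) ≤ (rem : Int) := by positivity
      omega
    have hne := af_ne_nil_of_sum_ne arr hsne
    rw [af_zero] at hne
    have hlen : 0 < (aliveL arr 0).length := List.length_pos_iff.mpr hne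
    apply roundB_mono (rem - (aliveL arr 0).length)
    · push_cast [Nat.cast_sub (by omega : (aliveL arr 0).length ≤ rem)]; ring
    · rw [sum_map_decOne arr 0]; omega
    · omega
    · omega

-- ----- A's outer loop -----

lemma outerA_mod (f : Nat) (arr : List Int) (L S0 k t i : Int) (hL : 0 < L) :
    outerA (f + 1) arr L S0 k t (PySem.Int.mod i L) = outerA (f + 1) arr L S0 k t i := by
  rw [outerA_succ, outerA_succ]
  have hmm : PySem.Int.mod (PySem.Int.mod i L) L = PySem.Int.mod i L := by
    rw [PySem.Int.mod_eq_emod_of_pos hL, PySem.Int.mod_eq_emod_of_pos hL]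
    exact Int.emod_emod_of_dvd _ dvd_rfl
  rw [hmm]

lemma skipA : ∀ (d : Nat) (arr : List Int) (j fuel : Nat) (S0 k t : Int),
    j + d ≤ arr.length → t ≠ S0 → t ≠ k →
    (∀ q (hq : q < arr.length), j ≤ q → q < j + d → arr[q] = 0) →
    d ≤ fuel →
    outerA fuel arr (arr.length : Int) S0 k t (j : Int)
      = outerA (fuel - d) arr (arr.length : Int) S0 k t ((j + d : Nat) : Int) := by
  intro d
  induction d with
  | zero => intro arr j fuel S0 k t _ _ _ _ _; simp
  | succ d ih =>
    intro arr j fuel S0 k t hlen ht hk hz hfuel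
    obtain ⟨f, rfl⟩ : ∃ f, fuel = f + 1 := ⟨fuel - 1, by omega⟩
    rw [outerA_succ, mod_cast_lt j arr.length (by omega), if_neg ht, if_neg hk,
      PySem.List.pyGetD_natCast, List.getD_eq_getElem _ _ (by omega : j < arr.length),
      hz j (by omega) (le_refl j) (by omega), if_neg (by simp)]
    have hcast : (j : Int) + 1 = ((j + 1 : Nat) : Int) := by push_cast; ring
    rw [hcast, ih arr (j + 1) f S0 k t (by omega) ht hk
      (fun q hq h1 h2 => hz q hq (by omega) (by omega)) (by omega)]
    simp only [show f + 1 - (d + 1) = f - d from by omega, show j + (d + 1) = j + 1 + d from by omega]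

lemma mainA : ∀ (rem : Nat) (arr : List Int) (j fuel : Nat) (S0 k t : Int),
    j ≤ arr.length →
    t = S0 - arr.sum → k = t + (rem : Int) → (arr.sum < 0 ∨ (rem : Int) < arr.sum) →
    (rem + 1) * (arr.length + 1) + (arr.length - j) + 2 ≤ fuel →
    outerA fuel arr (arr.length : Int) S0 k t (j : Int) = targetR arr j rem := by
  intro rem
  induction rem using Nat.strong_induction_on with
  | _ rem IHrem =>
    suffices H : ∀ (d : Nat) (arr : List Int) (j fuel : Nat) (S0 k t : Int),
        arr.length - j = d → j ≤ arr.length →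
        t = S0 - arr.sum → k = t + (rem : Int) → (arr.sum < 0 ∨ (rem : Int) < arr.sum) →
        (rem + 1) * (arr.length + 1) + (arr.length - j) + 2 ≤ fuel →
        outerA fuel arr (arr.length : Int) S0 k t (j : Int) = targetR arr j rem by
      intro arr j fuel S0 k t h2 h3 h4 h5 h6
      exact H (arr.length - j) arr j fuel S0 k t rfl h2 h3 h4 h5 h6
    intro d
    induction d using Nat.strong_induction_on with
    | _ d IHd =>
      intro arr j fuel S0 k t hd hj ht hk hcond hfuel
      have h0rem : (0 : Int) ≤ (rem : Int) := by positivity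
      have hsne : arr.sum ≠ 0 := by omega
      have hlen : 0 < arr.length := by
        cases arr with
        | nil => simp at hsne
        | cons a l => simp
      have htS : t ≠ S0 := by omega
      have hprod : (rem + 1) * (arr.length + 1) = rem * (arr.length + 1) + (arr.length + 1) := by
        ring
      obtain ⟨f, rfl⟩ : ∃ f, fuel = f + 1 := ⟨fuel - 1, by omega⟩
      by_cases hje : j = arr.length
      · -- j = length : the index wraps to 0
        rw [hje, ← outerA_mod f arr (arr.length : Int) S0 k t ((arr.length : Nat) : Int)
          (by exact_mod_cast hlen), mod_cast_self arr.length hlen]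
        by_cases hrem0 : rem = 0
        · subst hrem0
          rw [outerA_succ, mod_cast_lt 0 arr.length hlen, if_neg htS,
            if_pos (by simpa using hk.symm)]
          rw [inner_full arr 0 (arr.length + 1) hlen (af_ne_nil_of_sum_ne arr hsne)
            (le_refl _)]
          rw [hje] at *
          rw [target_zero arr arr.length hsne]
          obtain ⟨p0, r0, haf0⟩ := List.exists_cons_of_ne_nil (af_ne_nil_of_sum_ne arr hsne)
          simp [innerRes, af_len, haf0]
        · have htk : t ≠ k := by
            intro h; rw [← h] at hk; omega
          obtain ⟨p, rest, haf0⟩ := List.exists_cons_of_ne_nil (af_ne_nil_of_sum_ne arr hsne)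
          obtain ⟨-, hp, hpos, hrest, hzz⟩ :=
            af_head arr.length arr 0 p rest (by omega) (Nat.zero_le _) haf0
          rw [skipA p arr 0 (f + 1) S0 k t (by omega) htS htk
            (fun q hq h1 h2 => hzz q hq (by omega) (by omega)) (by omega)]
          simp only [Nat.zero_add]
          obtain ⟨g, hg⟩ : ∃ g, f + 1 - p = g + 1 := ⟨f - p, by omega⟩
          rw [hg, outerA_succ, mod_cast_lt p arr.length hp, if_neg htS, if_neg htk,
            PySem.List.pyGetD_natCast, List.getD_eq_getElem _ _ hp,
            if_pos hpos, PySem.List.pySetD_natCast]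
          have hcast : (p : Int) + 1 = ((p + 1 : Nat) : Int) := by push_cast; ring
          rw [hcast]
          have happ := IHrem (rem - 1) (by omega) (arr.set p (arr[p] - 1)) (p + 1) g S0 k (t + 1)
            (by simp; omega)
            (by rw [sum_set' arr p (arr[p] - 1) hp, List.getD_eq_getElem _ _ hp]; omega)
            (by push_cast [Nat.cast_sub (by omega : 1 ≤ rem)]; omega)
            (by rw [sum_set' arr p (arr[p] - 1) hp, List.getD_eq_getElem _ _ hp]
                push_cast [Nat.cast_sub (by omega : 1 ≤ rem)]; omega)
            (by simp only [List.length_set]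
                have he : rem - 1 + 1 = rem := by omega
                rw [he]
                omega)
          simp only [List.length_set] at happ
          rw [happ]
          exact target_wrap arr p rem rest (by omega) hcond haf0 hp hpos
            (fun q hq h2 => hzz q hq (by omega) h2) hrest
      · -- j < length
        have hjlt : j < arr.length := by omega
        rw [outerA_succ, mod_cast_lt j arr.length hjlt, if_neg htS]
        by_cases hrem0 : rem = 0
        · subst hrem0
          rw [if_pos (by simpa using hk.symm)]
          rw [inner_full arr j (arr.length + 1) hjlt (af_ne_nil_of_sum_ne arr hsne)
            (le_refl _)]
          exact (target_zero arr j hsne).symm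
        · have htk : t ≠ k := by
            intro h; rw [← h] at hk; omega
          rw [if_neg htk, PySem.List.pyGetD_natCast, List.getD_eq_getElem _ _ hjlt]
          by_cases hpos : arr[j] ≠ 0
          · rw [if_pos hpos, PySem.List.pySetD_natCast]
            have hcast : (j : Int) + 1 = ((j + 1 : Nat) : Int) := by push_cast; ring
            rw [hcast]
            have happ := IHrem (rem - 1) (by omega) (arr.set j (arr[j] - 1)) (j + 1) f S0 k (t + 1)
              (by simp; omega)
              (by rw [sum_set' arr j (arr[j] - 1) hjlt, List.getD_eq_getElem _ _ hjlt]; omega)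
              (by push_cast [Nat.cast_sub (by omega : 1 ≤ rem)]; omega)
              (by rw [sum_set' arr j (arr[j] - 1) hjlt, List.getD_eq_getElem _ _ hjlt]
                  push_cast [Nat.cast_sub (by omega : 1 ≤ rem)]; omega)
              (by simp only [List.length_set]
                  have he : rem - 1 + 1 = rem := by omega
                  rw [he]
                  omega)
            simp only [List.length_set] at happ
            rw [happ]
            exact target_dec arr j rem hjlt hpos (by omega)
          · have hj0 : arr[j] = 0 := by omega
            rw [if_neg hpos]
            have hcast : (j : Int) + 1 = ((j + 1 : Nat) : Int) := by push_cast; ring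
            rw [hcast]
            have happ := IHd (arr.length - (j + 1)) (by omega) arr (j + 1) f S0 k t rfl
              (by omega) ht hk hcond (by omega)
            rw [happ]
            exact target_skip arr j rem hjlt hj0

lemma negA : ∀ (s : Nat) (arr : List Int) (j fuel : Nat) (S0 k t : Int),
    j ≤ arr.length →
    t = S0 - arr.sum → arr.sum = (s : Int) → S0 ≤ k →
    (s + 1) * (arr.length + 1) + (arr.length - j) + 2 ≤ fuel →
    outerA fuel arr (arr.length : Int) S0 k t (j : Int) = -1 := by
  intro s
  induction s using Nat.strong_induction_on with
  | _ s IHs =>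
    suffices H : ∀ (d : Nat) (arr : List Int) (j fuel : Nat) (S0 k t : Int),
        arr.length - j = d → j ≤ arr.length →
        t = S0 - arr.sum → arr.sum = (s : Int) → S0 ≤ k →
        (s + 1) * (arr.length + 1) + (arr.length - j) + 2 ≤ fuel →
        outerA fuel arr (arr.length : Int) S0 k t (j : Int) = -1 by
      intro arr j fuel S0 k t h2 h3 h4 h5 h6
      exact H (arr.length - j) arr j fuel S0 k t rfl h2 h3 h4 h5 h6
    intro d
    induction d using Nat.strong_induction_on with
    | _ d IHd =>
      intro arr j fuel S0 k t hd hj ht hsum hkc hfuel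
      have hprod : (s + 1) * (arr.length + 1) = s * (arr.length + 1) + (arr.length + 1) := by
        ring
      obtain ⟨f, rfl⟩ : ∃ f, fuel = f + 1 := ⟨fuel - 1, by omega⟩
      by_cases hs0 : s = 0
      · subst hs0
        rw [outerA_succ, if_pos (by simp at hsum; omega)]
      · have hsne : arr.sum ≠ 0 := by omega
        have hlen : 0 < arr.length := by
          cases arr with
          | nil => simp at hsne
          | cons a l => simp
        have htS : t ≠ S0 := by omega
        have htk : t ≠ k := by omega
        by_cases hje : j = arr.length
        · rw [hje, ← outerA_mod f arr (arr.length : Int) S0 k t ((arr.length : Nat) : Int)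
            (by exact_mod_cast hlen), mod_cast_self arr.length hlen]
          obtain ⟨p, rest, haf0⟩ := List.exists_cons_of_ne_nil (af_ne_nil_of_sum_ne arr hsne)
          obtain ⟨-, hp, hpos, hrest, hzz⟩ :=
            af_head arr.length arr 0 p rest (by omega) (Nat.zero_le _) haf0
          rw [skipA p arr 0 (f + 1) S0 k t (by omega) htS htk
            (fun q hq h1 h2 => hzz q hq (by omega) (by omega)) (by omega)]
          simp only [Nat.zero_add]
          obtain ⟨g, hg⟩ : ∃ g, f + 1 - p = g + 1 := ⟨f - p, by omega⟩
          rw [hg, outerA_succ, mod_cast_lt p arr.length hp, if_neg htS, if_neg htk,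
            PySem.List.pyGetD_natCast, List.getD_eq_getElem _ _ hp,
            if_pos hpos, PySem.List.pySetD_natCast]
          have hcast : (p : Int) + 1 = ((p + 1 : Nat) : Int) := by push_cast; ring
          rw [hcast]
          have happ := IHs (s - 1) (by omega) (arr.set p (arr[p] - 1)) (p + 1) g S0 k (t + 1)
            (by simp; omega)
            (by rw [sum_set' arr p (arr[p] - 1) hp, List.getD_eq_getElem _ _ hp]; omega)
            (by rw [sum_set' arr p (arr[p] - 1) hp, List.getD_eq_getElem _ _ hp]
                push_cast [Nat.cast_sub (by omega : 1 ≤ s)]; omega)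
            hkc
            (by simp only [List.length_set]
                have he : s - 1 + 1 = s := by omega
                have hprod2 : (s - 1 + 1) * (arr.length + 1) = s * (arr.length + 1) := by rw [he]
                rw [hprod2]
                omega)
          simp only [List.length_set] at happ
          exact happ
        · have hjlt : j < arr.length := by omega
          rw [outerA_succ, mod_cast_lt j arr.length hjlt, if_neg htS, if_neg htk,
            PySem.List.pyGetD_natCast, List.getD_eq_getElem _ _ hjlt]
          by_cases hpos : arr[j] ≠ 0
          · rw [if_pos hpos, PySem.List.pySetD_natCast]
            have hcast : (j : Int) + 1 = ((j + 1 : Nat) : Int) := by push_cast; ring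
            rw [hcast]
            have happ := IHs (s - 1) (by omega) (arr.set j (arr[j] - 1)) (j + 1) f S0 k (t + 1)
              (by simp; omega)
              (by rw [sum_set' arr j (arr[j] - 1) hjlt, List.getD_eq_getElem _ _ hjlt]; omega)
              (by rw [sum_set' arr j (arr[j] - 1) hjlt, List.getD_eq_getElem _ _ hjlt]
                  push_cast [Nat.cast_sub (by omega : 1 ≤ s)]; omega)
              hkc
              (by simp only [List.length_set]
                  have he : s - 1 + 1 = s := by omega
                  have hprod2 : (s - 1 + 1) * (arr.length + 1) = s * (arr.length + 1) := by rw [he]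
                  rw [hprod2]
                  omega)
            simp only [List.length_set] at happ
            exact happ
          · have hj0 : arr[j] = 0 := by omega
            rw [if_neg hpos]
            have hcast : (j : Int) + 1 = ((j + 1 : Nat) : Int) := by push_cast; ring
            rw [hcast]
            exact IHd (arr.length - (j + 1)) (by omega) arr (j + 1) f S0 k t rfl
              (by omega) ht hsum hkc (by omega)

-- ===== VERDICT (by name: the statement is the Claim_ definition above) =====
theorem solution_spec : Claim_equal_solution := by
  unfold Claim_equal_solution
  intro ft k _ hPre
  obtain ⟨hne, hk0⟩ := hPre
  unfold Spec_solution solution solution_alt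
  rw [PySem.List.len_eq]
  have hmap : ft.sum ≤ ((ft.map Int.toNat).sum : Int) := sum_le_toNat ft
  by_cases hks : 0 ≤ ft.sum ∧ ft.sum ≤ k
  · simp only [if_pos hks]
    have hmul : (ft.sum.toNat + 1) * (ft.length + 1)
        ≤ (k.toNat + (ft.map Int.toNat).sum + 1) * (ft.length + 2) :=
      Nat.mul_le_mul (by omega) (by omega)
    have happ := negA ft.sum.toNat ft 0
      ((k.toNat + (ft.map Int.toNat).sum + 1) * (ft.length + 2) + ft.length + 2)
      ft.sum k 0 (Nat.zero_le _) (by omega)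
      (by rw [Int.toNat_of_nonneg hks.1]) hks.2 (by omega)
    simp only [Nat.cast_zero] at happ
    exact happ
  · simp only [if_neg hks]
    have hmul : (k.toNat + 1) * (ft.length + 1)
        ≤ (k.toNat + (ft.map Int.toNat).sum + 1) * (ft.length + 2) :=
      Nat.mul_le_mul (by omega) (by omega)
    have hcond : ft.sum < 0 ∨ ((k.toNat : Nat) : Int) < ft.sum := by omega
    have happ := mainA k.toNat ft 0
      ((k.toNat + (ft.map Int.toNat).sum + 1) * (ft.length + 2) + ft.length + 2)
      ft.sum k 0 (Nat.zero_le _) (by omega) (by omega) hcond (by omega)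
    simp only [Nat.cast_zero] at happ
    rw [happ, target_round ft k.toNat hcond]
    rw [show ((k.toNat : Nat) : Int) = k from Int.toNat_of_nonneg hk0]
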